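-- pv_equiv track=rewrite | github.com/ClarifyGPT/ClarifyGPT | src/clarify/utils.py | parse_cq_mbpp
-- ===== SOURCE A (Python) =====
-- def parse_cq_mbpp(generated_cq):
--     assert '### Clarifying Question' in generated_cq
--     generated_cq_list = generated_cq.split('\n')
--     iidx = 0
--     for idx in range(len(generated_cq_list)):
--         iidx += 1
--         if '### Clarifying Question' in generated_cq_list[idx]:
--             break
--     cq = '\n'.join(generated_cq_list[iidx:])
--     return cq
-- ===== SOURCE B (Python) =====
-- def parse_cq_mbpp(generated_cq):
--     assert '### Clarifying Question' in generated_cq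
--     pos = generated_cq.index('### Clarifying Question')
--     nl = generated_cq.find('\n', pos)
--     return '' if nl == -1 else generated_cq[nl + 1:]
-- ===== Notes on version B (the rewrite author's own statement) =====
-- stated objective: simpler
-- what changed: Instead of splitting into a line list and scanning it with an index loop then re-joining the tail, B finds the marker's byte offset, finds the next newline from there, and returns the slice after it.
import Mathlib
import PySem

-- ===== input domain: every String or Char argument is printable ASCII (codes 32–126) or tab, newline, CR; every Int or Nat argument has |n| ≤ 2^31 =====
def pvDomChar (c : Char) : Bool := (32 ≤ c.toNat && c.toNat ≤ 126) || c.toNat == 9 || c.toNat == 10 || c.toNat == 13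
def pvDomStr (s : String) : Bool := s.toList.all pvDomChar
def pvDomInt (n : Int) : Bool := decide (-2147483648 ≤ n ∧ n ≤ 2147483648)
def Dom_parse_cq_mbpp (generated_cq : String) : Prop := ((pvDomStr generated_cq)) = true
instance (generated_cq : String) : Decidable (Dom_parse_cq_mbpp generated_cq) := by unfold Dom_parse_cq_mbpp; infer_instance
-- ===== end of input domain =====

-- B replaces A's split-into-lines + index loop + re-join by a direct string search:
-- find the marker's offset, find the next newline from there, return the slice after it
-- (objective: simpler). Both raise AssertionError when the marker is absent (outside Pre_).

-- ===== PORT A =====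
def pvMarker : List Char := "### Clarifying Question".toList

-- the 'for idx in range(len(...)): iidx += 1; if marker in line: break' loop, as the value of iidx after it
def pvIidx : List (List Char) → Nat
  | [] => 0
  | l :: ls => if PySem.Chars.isIn pvMarker l then 1 else 1 + pvIidx ls

def parse_cq_mbpp (generated_cq : String) : String :=
  let generated_cq_list := PySem.Chars.splitOn generated_cq.toList ['\n']
  String.ofList (PySem.Chars.join ['\n'] (generated_cq_list.drop (pvIidx generated_cq_list)))

-- ===== PORT B =====
def parse_cq_mbpp_alt (generated_cq : String) : String :=
  let cs := generated_cq.toList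
  let pos := PySem.Chars.find cs pvMarker     -- = generated_cq.index(marker) under Pre_
  let nl := PySem.Chars.findFrom cs ['\n'] pos none
  if nl = -1 then "" else String.ofList (PySem.List.slice cs (some (nl + 1)) none)

-- ===== PRECONDITION & SPEC =====
-- Pre_: the marker occurs in the input; on all other inputs both A and B raise AssertionError.
def Pre_parse_cq_mbpp (generated_cq : String) : Prop :=
  PySem.Str.isIn "### Clarifying Question" generated_cq = true
instance (generated_cq : String) : Decidable (Pre_parse_cq_mbpp generated_cq) := by
  unfold Pre_parse_cq_mbpp; infer_instance

def pvWitness_parse_cq_mbpp : String := "### Clarifying Question\nWhat is n?"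

def Spec_parse_cq_mbpp (generated_cq : String) (out : String) : Prop := out = parse_cq_mbpp_alt generated_cq
instance (generated_cq : String) (out : String) : Decidable (Spec_parse_cq_mbpp generated_cq out) := by unfold Spec_parse_cq_mbpp; infer_instance

-- ===== CLAIM (what is proved, stated in full; the proofs are below) =====
def Claim_equal_parse_cq_mbpp : Prop := ∀ (generated_cq : String), Dom_parse_cq_mbpp generated_cq → Pre_parse_cq_mbpp generated_cq → Spec_parse_cq_mbpp generated_cq (parse_cq_mbpp generated_cq)

-- ===== LEMMAS AND PROOFS =====

-- char-level statements of the two programs (proof helpers)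
def pvA (cs : List Char) : List Char :=
  let L := PySem.Chars.splitOn cs ['\n']
  PySem.Chars.join ['\n'] (L.drop (pvIidx L))

def pvB (cs : List Char) : List Char :=
  let nl := PySem.Chars.findFrom cs ['\n'] (PySem.Chars.find cs pvMarker) none
  if nl = -1 then [] else PySem.List.slice cs (some (nl + 1)) none

theorem pv_find_go_nil (sub : List Char) (k : Nat) :
    PySem.Chars.find.go sub [] k = if sub.isEmpty then (k : Int) else -1 := rfl
theorem pv_find_go_cons (sub : List Char) (c : Char) (s : List Char) (k : Nat) :
    PySem.Chars.find.go sub (c :: s) k =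
      if sub.isPrefixOf (c :: s) then (k : Int) else PySem.Chars.find.go sub s (k + 1) := rfl

theorem pv_infix_of_prefix_drop (sub s : List Char) (j : Nat) (h : sub <+: s.drop j) :
    sub <:+: s := by
  rcases h with ⟨r, hr⟩
  exact ⟨s.take j, r, by rw [List.append_assoc, hr, List.take_append_drop]⟩

theorem pv_find_go_add (sub : List Char) (s : List Char) (h : sub <:+: s) (k : Nat) :
    PySem.Chars.find.go sub s k = (k : Int) + PySem.Chars.find s sub := by
  induction s generalizing k with
  | nil =>
    rcases List.eq_nil_of_infix_nil h with rfl
    simp [PySem.Chars.find, pv_find_go_nil]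
  | cons c s ih =>
    by_cases hp : sub.isPrefixOf (c :: s)
    · simp [PySem.Chars.find, pv_find_go_cons, hp]
    · have hs : sub <:+: s := by
        rcases (PySem.Chars.exists_prefix_drop_iff_isIn sub (c :: s)).2
          ((PySem.Chars.isIn_iff_infix sub (c :: s)).2 h) with ⟨j, hj⟩
        cases j with
        | zero => simp at hj; exact absurd ((List.isPrefixOf_iff_prefix).2 hj) hp
        | succ j => exact pv_infix_of_prefix_drop sub s j hj
      rw [pv_find_go_cons, if_neg hp, ih hs k.succ,
        show PySem.Chars.find (c :: s) sub = PySem.Chars.find.go sub (c :: s) 0 from rfl,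
        pv_find_go_cons, if_neg hp, ih hs 1]
      push_cast; ring



theorem pv_find_cons (sub : List Char) (c : Char) (s : List Char)
    (hnp : ¬ sub <+: (c :: s)) (h : sub <:+: s) :
    PySem.Chars.find (c :: s) sub = 1 + PySem.Chars.find s sub := by
  have : PySem.Chars.find (c :: s) sub = PySem.Chars.find.go sub (c :: s) 0 := rfl
  rw [this, pv_find_go_cons, if_neg (by simpa [List.isPrefixOf_iff_prefix] using hnp),
    pv_find_go_add sub s h 1]
  norm_num

theorem pv_prefix_split (sub l t : List Char) (hnl : '\n' ∉ sub)
    (h : sub <+: l ++ '\n' :: t) : sub <+: l := by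
  have htake := List.prefix_iff_eq_take.1 h
  by_cases hle : sub.length ≤ l.length
  · rw [List.prefix_iff_eq_take, htake, List.take_append_of_le_length hle,
      List.length_take, Nat.min_eq_left hle]
  · exfalso
    apply hnl
    rw [htake]
    refine List.mem_take_iff_getElem.2 ⟨l.length, by simp; omega, ?_⟩
    simp [List.getElem_append_right (Nat.le_refl _)]


theorem pv_infix_split (sub l t : List Char) (hnl : '\n' ∉ sub)
    (h : sub <:+: l ++ '\n' :: t) : sub <:+: l ∨ sub <:+: t := by
  rcases (PySem.Chars.exists_prefix_drop_iff_isIn sub _).2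
    ((PySem.Chars.isIn_iff_infix sub _).2 h) with ⟨j, hj⟩
  by_cases hle : j ≤ l.length
  · rw [List.drop_append_of_le_length hle] at hj
    exact Or.inl (pv_infix_of_prefix_drop _ _ _ (pv_prefix_split sub _ t hnl hj))
  · right
    rw [List.drop_append] at hj
    have hd : l.drop j = [] := List.drop_eq_nil_of_le (by omega)
    rw [hd, List.nil_append] at hj
    rcases Nat.exists_eq_add_of_le (show l.length + 1 ≤ j - l.length + l.length by omega) with _
    have : ('\n' :: t).drop (j - l.length) = t.drop (j - l.length - 1) := by
      rw [show j - l.length = (j - l.length - 1) + 1 by omega]; simp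
    rw [this] at hj
    exact pv_infix_of_prefix_drop _ _ _ hj

theorem pv_find_newline (l t : List Char) (hl : '\n' ∉ l) :
    PySem.Chars.find (l ++ '\n' :: t) ['\n'] = (l.length : Int) := by
  induction l with
  | nil =>
    show PySem.Chars.find.go ['\n'] ('\n' :: t) 0 = 0
    rw [pv_find_go_cons]; simp
  | cons c l ih =>
    have hc : c ≠ '\n' := fun hc => hl (hc ▸ List.mem_cons_self)
    have hnp : ¬ ['\n'] <+: (c :: (l ++ '\n' :: t)) := by
      intro hp; rcases hp with ⟨r, hr⟩; simp at hr; exact hc hr.1.symm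
    rw [List.cons_append, pv_find_cons _ _ _ hnp
      ⟨l, t, by simp⟩, ih (fun hm => hl (List.mem_cons_of_mem _ hm))]
    simp [List.length_cons]; ring

theorem pv_find_skip (sub l t : List Char) (hnl : '\n' ∉ sub)
    (hni : ¬ sub <:+: l) (hst : sub <:+: t) :
    PySem.Chars.find (l ++ '\n' :: t) sub = (l.length : Int) + 1 + PySem.Chars.find t sub := by
  induction l with
  | nil =>
    have hnp : ¬ sub <+: ('\n' :: t) := by
      intro hp
      rcases sub with _ | ⟨c, sub'⟩
      · exact hni List.nil_infix
      · rcases hp with ⟨r, hr⟩; simp at hr; exact hnl (hr.1 ▸ List.mem_cons_self)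
    rw [List.nil_append, pv_find_cons _ _ _ hnp hst]; simp
  | cons c l ih =>
    have hnp : ¬ sub <+: (c :: l ++ '\n' :: t) := by
      intro hp
      exact hni ((pv_prefix_split sub (c :: l) t hnl (by simpa using hp)).isInfix)
    have hni' : ¬ sub <:+: l := fun h => hni (List.infix_cons h)
    have hinf : sub <:+: (l ++ '\n' :: t) := by
      rcases hst with ⟨u, v, huv⟩
      exact ⟨l ++ '\n' :: u, v, by simp [← huv]⟩
    rw [List.cons_append, pv_find_cons _ _ _ (by simpa using hnp) hinf, ih hni']
    simp [List.length_cons]; ring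

theorem pv_go_zero (sep l cur : List Char) (acc : List (List Char)) :
    PySem.Chars.splitOn.go sep 0 l cur acc = ((cur.reverse ++ l) :: acc).reverse := rfl
theorem pv_go_nil (sep cur : List Char) (fuel : Nat) (acc : List (List Char)) :
    PySem.Chars.splitOn.go sep (fuel + 1) [] cur acc = (cur.reverse :: acc).reverse := rfl
theorem pv_go_cons (sep cur : List Char) (fuel : Nat) (c : Char) (rest : List Char) (acc : List (List Char)) :
    PySem.Chars.splitOn.go sep (fuel + 1) (c :: rest) cur acc =
      if sep.isPrefixOf (c :: rest) then
        PySem.Chars.splitOn.go sep fuel (List.drop sep.length (c :: rest)) [] (cur.reverse :: acc)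
      else PySem.Chars.splitOn.go sep fuel rest (c :: cur) acc := rfl

theorem pv_go_acc (sep : List Char) (fuel : Nat) : ∀ (l cur : List Char) (acc acc' : List (List Char)),
    PySem.Chars.splitOn.go sep fuel l cur (acc ++ acc') =
      acc'.reverse ++ PySem.Chars.splitOn.go sep fuel l cur acc := by
  induction fuel with
  | zero => intro l cur acc acc'; simp [pv_go_zero]
  | succ fuel ih =>
    intro l cur acc acc'
    cases l with
    | nil => simp [pv_go_nil]
    | cons c rest =>
      rw [pv_go_cons, pv_go_cons]
      split_ifs
      · rw [show cur.reverse :: (acc ++ acc') = (cur.reverse :: acc) ++ acc' from rfl, ih]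
      · rw [ih]

theorem pv_go_clean (fuel : Nat) : ∀ (l cur : List Char) (acc : List (List Char)), '\n' ∉ l →
    PySem.Chars.splitOn.go ['\n'] fuel l cur acc = ((cur.reverse ++ l) :: acc).reverse := by
  induction fuel with
  | zero => intro l cur acc _; exact pv_go_zero _ _ _ _
  | succ fuel ih =>
    intro l cur acc hl
    cases l with
    | nil => simp [pv_go_nil]
    | cons c rest =>
      have hc : c ≠ '\n' := fun h => hl (h ▸ List.mem_cons_self)
      rw [pv_go_cons, if_neg (by simp [List.isPrefixOf_iff_prefix, List.cons_prefix_cons]; intro h; exact hc h.symm),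
        ih rest (c :: cur) acc (fun h => hl (List.mem_cons_of_mem _ h))]
      simp

theorem pv_go_skip (fuel : Nat) : ∀ (l t cur : List Char) (acc : List (List Char)), '\n' ∉ l →
    l.length < fuel →
    PySem.Chars.splitOn.go ['\n'] fuel (l ++ '\n' :: t) cur acc =
      PySem.Chars.splitOn.go ['\n'] (fuel - l.length - 1) t [] ((cur.reverse ++ l) :: acc) := by
  induction fuel with
  | zero => intro l t cur acc _ h; omega
  | succ fuel ih =>
    intro l t cur acc hl hf
    cases l with
    | nil =>
      rw [List.nil_append, pv_go_cons, if_pos (by simp)]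
      simp
    | cons c rest =>
      have hc : c ≠ '\n' := fun h => hl (h ▸ List.mem_cons_self)
      rw [List.cons_append, pv_go_cons,
        if_neg (by simp [List.isPrefixOf_iff_prefix, List.cons_prefix_cons]; intro h; exact hc h.symm),
        ih rest t (c :: cur) acc (fun h => hl (List.mem_cons_of_mem _ h)) (by simp at hf; omega)]
      simp [List.length_cons]

theorem pv_splitOn_clean (l : List Char) (hl : '\n' ∉ l) :
    PySem.Chars.splitOn l ['\n'] = [l] := by
  unfold PySem.Chars.splitOn
  rw [pv_go_clean _ l [] [] hl]; simp

theorem pv_splitOn_cons (l t : List Char) (hl : '\n' ∉ l) :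
    PySem.Chars.splitOn (l ++ '\n' :: t) ['\n'] = l :: PySem.Chars.splitOn t ['\n'] := by
  unfold PySem.Chars.splitOn
  rw [pv_go_skip _ l t [] [] hl (by simp)]
  have hfuel : (l ++ '\n' :: t).length + 1 - l.length - 1 = t.length + 1 := by simp; omega
  rw [hfuel, show ([] : List Char).reverse ++ l = l by simp,
    show [l] = [] ++ [l] from rfl, pv_go_acc]
  simp





theorem pv_go_ne_nil (sep : List Char) (fuel : Nat) : ∀ (l cur : List Char) (acc : List (List Char)),
    PySem.Chars.splitOn.go sep fuel l cur acc ≠ [] := by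
  induction fuel with
  | zero => intro l cur acc; rw [pv_go_zero]; simp
  | succ fuel ih =>
    intro l cur acc
    cases l with
    | nil => rw [pv_go_nil]; simp
    | cons c rest => rw [pv_go_cons]; split_ifs <;> apply ih

theorem pv_splitOn_ne_nil (s : List Char) : PySem.Chars.splitOn s ['\n'] ≠ [] :=
  pv_go_ne_nil _ _ _ _ _

theorem pv_join_cons (l : List Char) (L : List (List Char)) (hL : L ≠ []) :
    PySem.Chars.join ['\n'] (l :: L) = l ++ '\n' :: PySem.Chars.join ['\n'] L := by
  rcases L with _ | ⟨l', L⟩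
  · exact absurd rfl hL
  · simp [PySem.Chars.join, List.intercalate]

theorem pv_first_newline (cs : List Char) (h : '\n' ∈ cs) :
    ∃ l t, cs = l ++ '\n' :: t ∧ '\n' ∉ l := by
  induction cs with
  | nil => cases h
  | cons c rest ih =>
    by_cases hc : c = '\n'
    · exact ⟨[], rest, by rw [hc]; simp, by simp⟩
    · rcases ih (by rcases List.mem_cons.1 h with h | h; exact absurd h.symm hc; exact h) with
        ⟨l, t, hlt, hl⟩
      exact ⟨c :: l, t, by rw [hlt]; simp, by simp [hl]; exact fun h' => hc h'.symm⟩

theorem pv_join_splitOn (n : Nat) : ∀ (t : List Char), t.length ≤ n →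
    PySem.Chars.join ['\n'] (PySem.Chars.splitOn t ['\n']) = t := by
  induction n with
  | zero =>
    intro t ht
    rcases List.length_eq_zero_iff.1 (Nat.le_zero.1 ht) with rfl
    rw [pv_splitOn_clean [] (by simp)]
    simp [PySem.Chars.join, List.intercalate]
  | succ n ih =>
    intro t ht
    by_cases hn : '\n' ∈ t
    · rcases pv_first_newline t hn with ⟨l, t', rfl, hl⟩
      rw [pv_splitOn_cons _ _ hl, pv_join_cons _ _ (pv_splitOn_ne_nil t'),
        ih t' (by simp at ht; omega)]
    · rw [pv_splitOn_clean _ hn]; simp [PySem.Chars.join, List.intercalate]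

theorem pv_core (n : Nat) : ∀ (cs : List Char), cs.length ≤ n → pvMarker <:+: cs → pvA cs = pvB cs := by
  induction n with
  | zero =>
    intro cs hlen h
    rcases List.length_eq_zero_iff.1 (Nat.le_zero.1 hlen) with rfl
    have : pvMarker = [] := List.eq_nil_of_infix_nil h
    exact absurd this (by decide)
  | succ n ih =>
    intro cs hlen h
    have hp : 0 ≤ PySem.Chars.find cs pvMarker := (PySem.Chars.find_nonneg_iff _ _).2 h
    by_cases hn : '\n' ∈ cs
    · rcases pv_first_newline cs hn with ⟨l, t, rfl, hl⟩
      rw [show pvA (l ++ '\n' :: t) =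
        PySem.Chars.join ['\n'] ((PySem.Chars.splitOn (l ++ '\n' :: t) ['\n']).drop
          (pvIidx (PySem.Chars.splitOn (l ++ '\n' :: t) ['\n']))) from rfl,
        pv_splitOn_cons l t hl]
      by_cases hml : pvMarker <:+: l
      · -- marker in the first line
        rw [show pvIidx (l :: PySem.Chars.splitOn t ['\n']) = 1 from by
          simp [pvIidx, (PySem.Chars.isIn_iff_infix _ _).2 hml]]
        rw [List.drop_one, List.tail_cons, pv_join_splitOn t.length t le_rfl]
        -- now the B side
        set p := PySem.Chars.find (l ++ '\n' :: t) pvMarker with hpdef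
        have hple : p.toNat ≤ l.length := by
          rcases (PySem.Chars.exists_prefix_drop_iff_isIn pvMarker l).2
            ((PySem.Chars.isIn_iff_infix _ _).2 hml) with ⟨j, hj⟩
          have hjle : j ≤ l.length := by
            by_contra hgt
            rw [List.drop_eq_nil_of_le (by omega)] at hj
            exact absurd (List.prefix_nil.1 hj) (by decide)
          have hj' : pvMarker <+: (l ++ '\n' :: t).drop j := by
            rw [List.drop_append_of_le_length hjle]
            exact hj.trans (List.prefix_append _ _)
          have hmin := (PySem.Chars.find_spec (s := l ++ '\n' :: t) (sub := pvMarker) hp).2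
          by_contra hgt
          exact hmin j (by omega) hj'
        have hklen : p.toNat ≤ (l ++ '\n' :: t).length := by simp; omega
        have hff : PySem.Chars.findFrom (l ++ '\n' :: t) ['\n'] p none = (l.length : Int) := by
          rw [show p = ((p.toNat : Nat) : Int) from (Int.toNat_of_nonneg hp).symm,
            PySem.Chars.findFrom_natCast _ _ p.toNat hklen,
            List.drop_append_of_le_length hple,
            pv_find_newline _ t (fun hm => hl (List.mem_of_mem_drop hm))]
          rw [if_neg (by omega), List.length_drop]
          omega
        rw [show pvB (l ++ '\n' :: t) =
          (if PySem.Chars.findFrom (l ++ '\n' :: t) ['\n'] (PySem.Chars.find (l ++ '\n' :: t) pvMarker) none = -1 then []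
           else PySem.List.slice (l ++ '\n' :: t)
             (some (PySem.Chars.findFrom (l ++ '\n' :: t) ['\n'] (PySem.Chars.find (l ++ '\n' :: t) pvMarker) none + 1)) none) from rfl,
          ← hpdef, hff, if_neg (by omega)]
        rw [show (l.length : Int) + 1 = ((l.length + 1 : Nat) : Int) by push_cast; ring,
          PySem.List.slice_from_natCast]
        rw [List.drop_append]
        simp
      · -- marker beyond the first line
        have hmt : pvMarker <:+: t := by
          rcases pv_infix_split pvMarker l t (by decide) h with h' | h'
          · exact absurd h' hml
          · exact h'
        rw [show pvIidx (l :: PySem.Chars.splitOn t ['\n']) =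
            1 + pvIidx (PySem.Chars.splitOn t ['\n']) from by
          simp [pvIidx, (PySem.Chars.isIn_iff_infix pvMarker l).not.2 hml]]
        rw [show (1 + pvIidx (PySem.Chars.splitOn t ['\n'])) = (pvIidx (PySem.Chars.splitOn t ['\n'])) + 1 by omega,
          List.drop_succ_cons]
        have hA : pvA t = pvB t := ih t (by simp at hlen; omega) hmt
        rw [show PySem.Chars.join ['\n'] ((PySem.Chars.splitOn t ['\n']).drop (pvIidx (PySem.Chars.splitOn t ['\n']))) = pvA t from rfl, hA]
        -- B side: pvB (l ++ '\n' :: t) = pvB t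
        set q := PySem.Chars.find t pvMarker with hqdef
        have hq : 0 ≤ q := (PySem.Chars.find_nonneg_iff _ _).2 hmt
        have hqlen : q.toNat ≤ t.length := by
          have := PySem.Chars.find_le_length t pvMarker
          omega
        have hfind : PySem.Chars.find (l ++ '\n' :: t) pvMarker = (l.length : Int) + 1 + q :=
          pv_find_skip pvMarker l t (by decide) hml hmt
        have hk : ((l.length + 1 + q.toNat : Nat) : Int) = (l.length : Int) + 1 + q := by
          push_cast; omega
        have hdropcs : (l ++ '\n' :: t).drop (l.length + 1 + q.toNat) = t.drop q.toNat := by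
          rw [List.drop_append, List.drop_eq_nil_of_le (by omega), List.nil_append,
            show l.length + 1 + q.toNat - l.length = q.toNat + 1 by omega, List.drop_succ_cons]
        have hffcs : PySem.Chars.findFrom (l ++ '\n' :: t) ['\n'] ((l.length : Int) + 1 + q) none =
            if PySem.Chars.find (t.drop q.toNat) ['\n'] = -1 then -1
            else ((l.length : Int) + 1 + q) + PySem.Chars.find (t.drop q.toNat) ['\n'] := by
          rw [← hk, PySem.Chars.findFrom_natCast _ _ _ (by simp; omega), hdropcs, hk]
        have hfft : PySem.Chars.findFrom t ['\n'] q none =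
            if PySem.Chars.find (t.drop q.toNat) ['\n'] = -1 then -1
            else q + PySem.Chars.find (t.drop q.toNat) ['\n'] := by
          rw [show q = ((q.toNat : Nat) : Int) from (Int.toNat_of_nonneg hq).symm,
            PySem.Chars.findFrom_natCast _ _ _ hqlen]
          rw [Int.toNat_of_nonneg hq]
        rw [show pvB (l ++ '\n' :: t) =
          (if PySem.Chars.findFrom (l ++ '\n' :: t) ['\n'] (PySem.Chars.find (l ++ '\n' :: t) pvMarker) none = -1 then []
           else PySem.List.slice (l ++ '\n' :: t)
             (some (PySem.Chars.findFrom (l ++ '\n' :: t) ['\n'] (PySem.Chars.find (l ++ '\n' :: t) pvMarker) none + 1)) none) from rfl,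
          hfind, hffcs,
          show pvB t =
          (if PySem.Chars.findFrom t ['\n'] (PySem.Chars.find t pvMarker) none = -1 then []
           else PySem.List.slice t
             (some (PySem.Chars.findFrom t ['\n'] (PySem.Chars.find t pvMarker) none + 1)) none) from rfl,
          ← hqdef, hfft]
        set f := PySem.Chars.find (t.drop q.toNat) ['\n'] with hfdef
        by_cases hf : f = -1
        · simp [hf]
        · have hf0 : 0 ≤ f := by
            have := PySem.Chars.neg_one_le_find (t.drop q.toNat) ['\n']
            rw [← hfdef] at this
            omega
          have h1 : (l.length : Int) + 1 + q + f + 1 = ((l.length + 1 + q.toNat + f.toNat + 1 : Nat) : Int) := by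
            push_cast; omega
          have h2 : q + f + 1 = ((q.toNat + f.toNat + 1 : Nat) : Int) := by push_cast; omega
          have hd1 : (l ++ '\n' :: t).drop (l.length + 1 + q.toNat + f.toNat + 1) =
              t.drop (q.toNat + f.toNat + 1) := by
            rw [List.drop_append]
            rw [List.drop_eq_nil_of_le (as := l) (by omega)]
            rw [List.nil_append,
              show l.length + 1 + q.toNat + f.toNat + 1 - l.length = (q.toNat + f.toNat + 1) + 1 by omega,
              List.drop_succ_cons]
          rw [if_neg hf, if_neg hf, if_neg (show ¬((l.length : Int) + 1 + q + f = -1) by omega),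
            if_neg (show ¬(q + f = -1) by omega), h1, h2,
            PySem.List.slice_from_natCast, PySem.List.slice_from_natCast, hd1]
    · -- no newline at all
      rw [show pvA cs = PySem.Chars.join ['\n']
          ((PySem.Chars.splitOn cs ['\n']).drop (pvIidx (PySem.Chars.splitOn cs ['\n']))) from rfl,
        pv_splitOn_clean cs hn,
        show pvIidx [cs] = 1 from by simp [pvIidx, (PySem.Chars.isIn_iff_infix _ _).2 h]]
      have hklen : (PySem.Chars.find cs pvMarker).toNat ≤ cs.length := by
        have := PySem.Chars.find_le_length cs pvMarker
        omega
      have hff : PySem.Chars.findFrom cs ['\n'] (PySem.Chars.find cs pvMarker) none = -1 := by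
        rw [show PySem.Chars.find cs pvMarker = (((PySem.Chars.find cs pvMarker).toNat : Nat) : Int)
            from (Int.toNat_of_nonneg hp).symm,
          PySem.Chars.findFrom_natCast _ _ _ hklen,
          if_pos ((PySem.Chars.find_eq_neg_one_iff
              (List.drop (PySem.Chars.find cs pvMarker).toNat cs) ['\n']).2 (fun hin =>
            hn (List.mem_of_mem_drop (hin.subset List.mem_cons_self))))]
      rw [show pvB cs =
        (if PySem.Chars.findFrom cs ['\n'] (PySem.Chars.find cs pvMarker) none = -1 then []
         else PySem.List.slice cs
           (some (PySem.Chars.findFrom cs ['\n'] (PySem.Chars.find cs pvMarker) none + 1)) none) from rfl,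
        hff, if_pos rfl]
      simp [PySem.Chars.join, List.intercalate]

-- ===== VERDICT (by name: the statement is the Claim_ definition above) =====
theorem parse_cq_mbpp_spec : Claim_equal_parse_cq_mbpp := by
  intro s _ hpre
  unfold Spec_parse_cq_mbpp parse_cq_mbpp parse_cq_mbpp_alt
  dsimp only
  have h : pvMarker <:+: s.toList := (PySem.Str.isIn_iff_infix _ _).1 hpre
  have hcore := pv_core s.toList.length s.toList le_rfl h
  simp only [pvA, pvB] at hcore
  rw [hcore]
  by_cases hnl : PySem.Chars.findFrom s.toList ['\n'] (PySem.Chars.find s.toList pvMarker) none = -1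
  · simp [hnl]
  · simp [hnl]
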